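-- pv_equiv track=rewrite | github.com/Kimsh1201/AI-class | chap 5.py | count_males_females
-- ===== SOURCE A (Python) =====
-- def count_males_females(person_list):
--     male_count = 0
--     female_count = 0
--
--     for person in person_list:
--         gender = person[2]
--         if gender == 1:
--             male_count += 1
--         elif gender == 0:
--             female_count += 1
--
--     return male_count, female_count
-- ===== SOURCE B (Python) =====
-- def count_males_females(person_list):
--     genders = [person[2] for person in person_list]
--     return genders.count(1), genders.count(0)
-- ===== Notes on version B (the rewrite author's own statement) =====
-- stated objective: idiomatic
-- what changed: B extracts the gender column once and uses list.count for each gender instead of per-element if/elif branching with two running counters.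
import Mathlib
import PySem

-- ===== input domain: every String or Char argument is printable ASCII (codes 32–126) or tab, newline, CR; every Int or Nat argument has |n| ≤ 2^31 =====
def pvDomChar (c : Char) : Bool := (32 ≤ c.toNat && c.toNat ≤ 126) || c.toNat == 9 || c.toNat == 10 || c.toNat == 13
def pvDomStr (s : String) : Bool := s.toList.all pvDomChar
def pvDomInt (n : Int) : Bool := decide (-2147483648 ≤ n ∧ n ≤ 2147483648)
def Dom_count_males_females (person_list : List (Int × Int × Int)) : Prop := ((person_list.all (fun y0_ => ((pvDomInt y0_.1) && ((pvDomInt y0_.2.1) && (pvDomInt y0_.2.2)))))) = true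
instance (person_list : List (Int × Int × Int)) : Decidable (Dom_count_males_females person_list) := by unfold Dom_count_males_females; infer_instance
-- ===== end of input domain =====

-- B replaces A's two running counters with if/elif by extracting the gender column once and counting 1s and 0s with list.count (idiomatic; same O(n) cost).

-- ===== PORT A =====
-- Port of A: fold over the list keeping (male_count, female_count), if/elif on gender.
def count_males_females (person_list : List (Int × Int × Int)) : Int × Int :=
  person_list.foldl
    (fun (acc : Int × Int) person =>
      let gender := person.2.2
      if gender == 1 then (acc.1 + 1, acc.2)
      else if gender == 0 then (acc.1, acc.2 + 1)
      else acc)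
    (0, 0)

-- ===== PORT B =====
-- Port of B: extract the gender column, then count each gender with list.count.
def count_males_females_alt (person_list : List (Int × Int × Int)) : Int × Int :=
  let genders := person_list.map (fun person => person.2.2)
  (PySem.List.count genders 1, PySem.List.count genders 0)

-- ===== PRECONDITION & SPEC =====
def Spec_count_males_females (person_list : List (Int × Int × Int)) (out : Int × Int) : Prop := out = count_males_females_alt person_list
instance (person_list : List (Int × Int × Int)) (out : Int × Int) : Decidable (Spec_count_males_females person_list out) := by unfold Spec_count_males_females; infer_instance

-- ===== CLAIM (what is proved, stated in full; the proofs are below) =====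
def Claim_equal_count_males_females : Prop := ∀ (person_list : List (Int × Int × Int)), Dom_count_males_females person_list → Spec_count_males_females person_list (count_males_females person_list)

-- ===== LEMMAS AND PROOFS =====

-- ===== VERDICT (by name: the statement is the Claim_ definition above) =====
theorem cmf_foldl (l : List (Int × Int × Int)) (m f : Int) :
    l.foldl
      (fun (acc : Int × Int) person =>
        let gender := person.2.2
        if gender == 1 then (acc.1 + 1, acc.2)
        else if gender == 0 then (acc.1, acc.2 + 1)
        else acc)
      (m, f)
    = (m + ((l.map (fun person => person.2.2)).count 1 : Nat),
       f + ((l.map (fun person => person.2.2)).count 0 : Nat)) := by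
  induction l generalizing m f with
  | nil => simp
  | cons p t ih =>
    simp only [List.foldl_cons, List.map_cons, List.count_cons]
    split
    · next h =>
      rw [ih]
      have h1 : p.2.2 = 1 := by simpa using h
      simp [h1, Prod.ext_iff]
      ring
    · split
      · next h h' =>
        rw [ih]
        have h1 : p.2.2 ≠ 1 := by simpa using h
        have h0 : p.2.2 = 0 := by simpa using h'
        simp [Prod.ext_iff]
        ring
      · next h h' =>
        rw [ih]
        have h1 : p.2.2 ≠ 1 := by simpa using h
        have h0 : p.2.2 ≠ 0 := by simpa using h'
        simp

-- ===== VERDICT (by name: the statement is the Claim_ definition above) =====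
theorem count_males_females_spec : Claim_equal_count_males_females := by
  intro l _
  show _ = _
  simp only [count_males_females, count_males_females_alt, PySem.List.count]
  rw [cmf_foldl]
  simp
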